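-- pv_equiv track=rewrite | github.com/mollha/SequenceAlignment | example.py | get_alignment_indices
-- ===== SOURCE A (Python) =====
-- def get_alignment_indices(s_align, t_align):
--
--     s_matches, t_matches = [], []
--     s_point, t_point = 0, 0
--
--     for i in range(len(s_align)):
--
--         if s_align[i] != "_" and t_align[i] != "_":
--
--             s_matches.append(s_point)
--             t_matches.append(t_point)
--
--             s_point += 1
--             t_point += 1
--
--         if s_align[i] != "_" and t_align[i] == "_":
--
--             s_point += 1
--
--         if s_align[i] == "_" and t_align[i] != "_":
--
--             t_point += 1
--
--     return s_matches, t_matches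
-- ===== SOURCE B (Python) =====
-- def get_alignment_indices(s_align, t_align):
--     n = len(s_align)
--     # prefix counts: s_pref[i] = number of non-gap chars of s_align before column i
--     s_pref = []
--     c = 0
--     for i in range(n):
--         s_pref.append(c)
--         if s_align[i] != "_":
--             c += 1
--     t_pref = []
--     c = 0
--     for i in range(len(t_align)):
--         t_pref.append(c)
--         if t_align[i] != "_":
--             c += 1
--     s_matches, t_matches = [], []
--     for i in range(n):
--         if s_align[i] != "_" and t_align[i] != "_":
--             s_matches.append(s_pref[i])
--             t_matches.append(t_pref[i])
--     return s_matches, t_matches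
-- ===== Notes on version B (the rewrite author's own statement) =====
-- stated objective: alternative
-- what changed: A's single loop carrying two running ungapped-position counters is replaced by first building two prefix-count tables (the ungapped position of each column) and then a separate filtering pass that reads them at matched columns.
import Mathlib
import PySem

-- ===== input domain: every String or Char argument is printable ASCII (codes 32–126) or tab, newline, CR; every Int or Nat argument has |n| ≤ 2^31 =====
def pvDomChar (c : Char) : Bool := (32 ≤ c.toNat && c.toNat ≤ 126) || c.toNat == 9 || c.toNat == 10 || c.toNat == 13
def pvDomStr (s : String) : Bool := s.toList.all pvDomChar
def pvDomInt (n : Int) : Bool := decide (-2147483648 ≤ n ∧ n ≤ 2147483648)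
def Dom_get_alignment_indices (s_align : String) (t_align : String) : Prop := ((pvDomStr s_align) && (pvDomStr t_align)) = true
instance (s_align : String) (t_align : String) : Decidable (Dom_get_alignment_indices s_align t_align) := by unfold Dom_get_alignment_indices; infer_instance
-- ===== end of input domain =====

-- B replaces A's single loop carrying two running counters by two prefix-count
-- tables built first and a second filtering pass that reads them (objective: alternative decomposition).

-- ===== PORT A =====
-- one iteration of A's loop; state = (s_matches, t_matches, s_point, t_point)
def pvStepA (sl tl : List Char) (acc : List Int × List Int × Int × Int) (i : Int) :
    List Int × List Int × Int × Int :=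
  let sc := PySem.List.pyGetD sl i '_'
  let tc := PySem.List.pyGetD tl i '_'
  let acc := if sc ≠ '_' ∧ tc ≠ '_' then
      (acc.1 ++ [acc.2.2.1], acc.2.1 ++ [acc.2.2.2], acc.2.2.1 + 1, acc.2.2.2 + 1)
    else acc
  let acc := if sc ≠ '_' ∧ tc = '_' then (acc.1, acc.2.1, acc.2.2.1 + 1, acc.2.2.2) else acc
  if sc = '_' ∧ tc ≠ '_' then (acc.1, acc.2.1, acc.2.2.1, acc.2.2.2 + 1) else acc

def get_alignment_indices (s_align : String) (t_align : String) : List Int × List Int :=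
  let r := (PySem.List.pyRange 0 (PySem.Str.len s_align) 1).foldl
      (pvStepA s_align.toList t_align.toList) ([], [], 0, 0)
  (r.1, r.2.1)

-- ===== PORT B =====
-- first pass of Source B: the list whose i-th entry is the number of non-'_' chars before i
def pvPrefCounts (cs : List Char) : List Int :=
  (cs.foldl (fun (acc : List Int × Int) ch =>
      (acc.1 ++ [acc.2], if ch ≠ '_' then acc.2 + 1 else acc.2)) ([], 0)).1

-- one iteration of Source B's final filtering loop
def pvStepB (sl tl : List Char) (spref tpref : List Int)
    (acc : List Int × List Int) (i : Int) : List Int × List Int :=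
  if PySem.List.pyGetD sl i '_' ≠ '_' ∧ PySem.List.pyGetD tl i '_' ≠ '_' then
    (acc.1 ++ [PySem.List.pyGetD spref i 0], acc.2 ++ [PySem.List.pyGetD tpref i 0])
  else acc

def get_alignment_indices_alt (s_align : String) (t_align : String) : List Int × List Int :=
  (PySem.List.pyRange 0 (PySem.Str.len s_align) 1).foldl
    (pvStepB s_align.toList t_align.toList
      (pvPrefCounts s_align.toList) (pvPrefCounts t_align.toList)) ([], [])

-- ===== PRECONDITION & SPEC =====
-- A raises IndexError as soon as a column beyond the end of t_align is read,
-- i.e. exactly when t_align is shorter than s_align; Pre_ excludes those inputs.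
def Pre_get_alignment_indices (s_align : String) (t_align : String) : Prop :=
  s_align.toList.length ≤ t_align.toList.length
instance (s_align : String) (t_align : String) : Decidable (Pre_get_alignment_indices s_align t_align) := by
  unfold Pre_get_alignment_indices; infer_instance

def pvWitness_get_alignment_indices : String × String := ("AB_C_", "A__BC")

def Spec_get_alignment_indices (s_align : String) (t_align : String) (out : List Int × List Int) : Prop := out = get_alignment_indices_alt s_align t_align
instance (s_align : String) (t_align : String) (out : List Int × List Int) : Decidable (Spec_get_alignment_indices s_align t_align out) := by unfold Spec_get_alignment_indices; infer_instance

-- ===== CLAIM (what is proved, stated in full; the proofs are below) =====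
def Claim_equal_get_alignment_indices : Prop := ∀ (s_align : String) (t_align : String), Dom_get_alignment_indices s_align t_align → Pre_get_alignment_indices s_align t_align → Spec_get_alignment_indices s_align t_align (get_alignment_indices s_align t_align)

-- ===== LEMMAS AND PROOFS =====

-- number of non-'_' characters among the first n characters of cs
def pvCnt (cs : List Char) (n : Nat) : Int :=
  ((cs.take n).countP (fun ch => ch != '_') : Int)

theorem pvPrefCounts_aux (cs : List Char) : ∀ (acc : List Int) (c : Int),
    (cs.foldl (fun (acc : List Int × Int) ch =>
        (acc.1 ++ [acc.2], if ch ≠ '_' then acc.2 + 1 else acc.2)) (acc, c)).1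
      = acc ++ (List.range cs.length).map (fun i => c + pvCnt cs i) := by
  induction cs with
  | nil => intro acc c; simp
  | cons ch cs ih =>
    intro acc c
    rw [List.foldl_cons, ih]
    simp only [List.length_cons, List.range_succ_eq_map, List.map_cons, List.map_map]
    have h0 : pvCnt (ch :: cs) 0 = 0 := by simp [pvCnt]
    have hs : ∀ i : Nat, pvCnt (ch :: cs) (i + 1)
        = (if ch ≠ '_' then (1 : Int) else 0) + pvCnt cs i := by
      intro i
      simp only [pvCnt, List.take_succ_cons, List.countP_cons]
      by_cases h : ch = '_'
      · simp [h]
      · simp [h]; omega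
    have : ((fun i => c + pvCnt (ch :: cs) i) ∘ (fun i => i + 1))
        = fun i => (if ch ≠ '_' then c + 1 else c) + pvCnt cs i := by
      funext i
      simp only [Function.comp, hs]
      by_cases h : ch = '_' <;> simp [h] <;> ring
    rw [this, h0]
    simp

theorem pvPrefCounts_eq (cs : List Char) :
    pvPrefCounts cs = (List.range cs.length).map (fun i => pvCnt cs i) := by
  have := pvPrefCounts_aux cs [] 0
  simpa [pvPrefCounts] using this

theorem pvPref_get (cs : List Char) (n : Nat) (h : n < cs.length) :
    PySem.List.pyGetD (pvPrefCounts cs) (n : Int) 0 = pvCnt cs n := by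
  rw [pvPrefCounts_eq]
  simp [PySem.List.pyGetD_natCast, List.getD_eq_getElem?_getD, h]

theorem pvChar_get (cs : List Char) (n : Nat) (h : n < cs.length) :
    PySem.List.pyGetD cs (n : Int) '_' = cs[n] := by
  simp [PySem.List.pyGetD_natCast, List.getD_eq_getElem?_getD, h]

theorem pvCnt_succ (cs : List Char) (n : Nat) (h : n < cs.length) :
    pvCnt cs (n + 1) = pvCnt cs n + (if cs[n] = '_' then 0 else 1) := by
  have ht : cs.take (n + 1) = cs.take n ++ [cs[n]] := by
    rw [List.take_add_one, List.getElem?_eq_getElem h]; rfl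
  rw [pvCnt, pvCnt, ht, List.countP_append]
  by_cases hc : cs[n] = '_' <;> simp [hc]

theorem pvMain (sl tl : List Char) (hlen : sl.length ≤ tl.length) :
    ∀ n, n ≤ sl.length →
      (List.range n).foldl (fun acc (i : Nat) => pvStepA sl tl acc (i : Int)) ([], [], 0, 0)
        = (((List.range n).foldl
              (fun acc (i : Nat) => pvStepB sl tl (pvPrefCounts sl) (pvPrefCounts tl) acc (i : Int))
              ([], [])).1,
           ((List.range n).foldl
              (fun acc (i : Nat) => pvStepB sl tl (pvPrefCounts sl) (pvPrefCounts tl) acc (i : Int))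
              ([], [])).2,
           pvCnt sl n, pvCnt tl n) := by
  intro n
  induction n with
  | zero => intro _; simp [pvCnt]
  | succ n ih =>
    intro h
    have hn : n < sl.length := by omega
    have hnt : n < tl.length := by omega
    rw [List.range_succ, List.foldl_append, List.foldl_append, ih (by omega)]
    simp only [List.foldl_cons, List.foldl_nil]
    by_cases hs : sl[n] = '_' <;> by_cases ht : tl[n] = '_' <;>
      simp [pvStepA, pvStepB, pvChar_get sl n hn, pvChar_get tl n hnt,
        pvPref_get sl n hn, pvPref_get tl n hnt,
        pvCnt_succ sl n hn, pvCnt_succ tl n hnt, hs, ht]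

-- ===== VERDICT (by name: the statement is the Claim_ definition above) =====
theorem get_alignment_indices_spec : Claim_equal_get_alignment_indices := by
  intro s t _ hpre
  unfold Spec_get_alignment_indices get_alignment_indices get_alignment_indices_alt
  rw [show PySem.Str.len s = ((s.toList.length : Nat) : Int) from by simp [PySem.Str.len_eq],
    PySem.List.pyRange_zero_natCast, List.foldl_map, List.foldl_map,
    pvMain s.toList t.toList hpre s.toList.length (le_refl _)]
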